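-- pv_equiv track=rewrite | github.com/Call-Sure-AI/csai-processor | src/services/prompt_template_service.py | generate_rag_acknowledgment
-- ===== SOURCE A (Python) =====
-- from typing import Dict, List, Optional
--
-- def generate_rag_acknowledgment(user_query: str, agent: Dict) -> str:
--     """
--     Generate intelligent acknowledgment before RAG query based on user's question
--     """
--     query_lower = user_query.lower()
--
--     # Analyze query intent
--     if any(word in query_lower for word in ['price', 'cost', 'fee', 'charge', 'payment', 'amount']):
--         return "Let me pull up our current pricing information for you."
--
--     elif any(word in query_lower for word in ['policy', 'terms', 'condition', 'coverage', 'include']):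
--         return "Let me check the policy details for you. One moment please."
--
--     elif any(word in query_lower for word in ['available', 'offer', 'provide', 'service', 'plan']):
--         return "Great question! Let me look up what we have available for you."
--
--     elif any(word in query_lower for word in ['how', 'process', 'procedure', 'step']):
--         return "Let me walk you through that process. Give me just a moment."
--
--     elif any(word in query_lower for word in ['when', 'time', 'schedule', 'appointment']):
--         return "Let me check our availability for you."
--
--     elif any(word in query_lower for word in ['benefit', 'advantage', 'feature']):
--         return "Let me get you the details on those benefits."
--
--     elif any(word in query_lower for word in ['compare', 'difference', 'versus', 'vs']):
--         return "Good question! Let me gather that comparison information for you."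
--
--     else:
--         # Default intelligent acknowledgment
--         return "Let me find the most accurate information for you. Just a moment."
-- ===== SOURCE B (Python) =====
-- KEYWORD_GROUP = {
--     'price': 0, 'cost': 0, 'fee': 0, 'charge': 0, 'payment': 0, 'amount': 0,
--     'policy': 1, 'terms': 1, 'condition': 1, 'coverage': 1, 'include': 1,
--     'available': 2, 'offer': 2, 'provide': 2, 'service': 2, 'plan': 2,
--     'how': 3, 'process': 3, 'procedure': 3, 'step': 3,
--     'when': 4, 'time': 4, 'schedule': 4, 'appointment': 4,
--     'benefit': 5, 'advantage': 5, 'feature': 5,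
--     'compare': 6, 'difference': 6, 'versus': 6, 'vs': 6,
-- }
--
-- MESSAGES = [
--     "Let me pull up our current pricing information for you.",
--     "Let me check the policy details for you. One moment please.",
--     "Great question! Let me look up what we have available for you.",
--     "Let me walk you through that process. Give me just a moment.",
--     "Let me check our availability for you.",
--     "Let me get you the details on those benefits.",
--     "Good question! Let me gather that comparison information for you.",
-- ]
--
-- DEFAULT = "Let me find the most accurate information for you. Just a moment."
--
-- def generate_rag_acknowledgment(user_query: str, agent) -> str:
--     query_lower = user_query.lower()
--     # smallest group index among all matching keywords (argmin over the flat map)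
--     best = min((g for w, g in KEYWORD_GROUP.items() if w in query_lower),
--                default=len(MESSAGES))
--     return MESSAGES[best] if best < len(MESSAGES) else DEFAULT
-- ===== Notes on version B (the rewrite author's own statement) =====
-- stated objective: alternative
-- what changed: Replaces the ordered if/elif group chain with a flat keyword-to-group-index map scanned once, returning the message of the minimum matching group index (argmin) instead of short-circuiting per group in branch order.
import Mathlib
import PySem

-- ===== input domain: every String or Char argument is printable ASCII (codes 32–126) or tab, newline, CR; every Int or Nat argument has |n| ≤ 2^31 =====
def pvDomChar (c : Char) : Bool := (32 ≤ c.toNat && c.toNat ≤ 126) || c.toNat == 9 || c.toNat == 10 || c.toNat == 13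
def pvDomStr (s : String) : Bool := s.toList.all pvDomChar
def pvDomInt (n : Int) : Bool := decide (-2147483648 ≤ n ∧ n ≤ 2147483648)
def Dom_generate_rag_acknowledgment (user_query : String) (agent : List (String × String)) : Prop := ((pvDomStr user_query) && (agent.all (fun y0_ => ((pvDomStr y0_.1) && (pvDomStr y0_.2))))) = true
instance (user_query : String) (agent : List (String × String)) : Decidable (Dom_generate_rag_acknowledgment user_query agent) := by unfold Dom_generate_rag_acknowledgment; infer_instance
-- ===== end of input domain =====

-- B replaces the ordered if/elif chain with a flat keyword→group-index map scanned once,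
-- returning the message of the minimum matching group index (objective: alternative).

-- ===== PORT A =====
def generate_rag_acknowledgment (user_query : String) (_agent : List (String × String)) : String :=
  let query_lower := PySem.Str.lower user_query
  if (["price", "cost", "fee", "charge", "payment", "amount"] : List String).any (fun word => PySem.Str.isIn word query_lower) then
    "Let me pull up our current pricing information for you."
  else if (["policy", "terms", "condition", "coverage", "include"] : List String).any (fun word => PySem.Str.isIn word query_lower) then
    "Let me check the policy details for you. One moment please."
  else if (["available", "offer", "provide", "service", "plan"] : List String).any (fun word => PySem.Str.isIn word query_lower) then
    "Great question! Let me look up what we have available for you."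
  else if (["how", "process", "procedure", "step"] : List String).any (fun word => PySem.Str.isIn word query_lower) then
    "Let me walk you through that process. Give me just a moment."
  else if (["when", "time", "schedule", "appointment"] : List String).any (fun word => PySem.Str.isIn word query_lower) then
    "Let me check our availability for you."
  else if (["benefit", "advantage", "feature"] : List String).any (fun word => PySem.Str.isIn word query_lower) then
    "Let me get you the details on those benefits."
  else if (["compare", "difference", "versus", "vs"] : List String).any (fun word => PySem.Str.isIn word query_lower) then
    "Good question! Let me gather that comparison information for you."
  else
    "Let me find the most accurate information for you. Just a moment."

-- ===== PORT B =====
def keywordGroup : List (String × Nat) :=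
  [("price", 0), ("cost", 0), ("fee", 0), ("charge", 0), ("payment", 0), ("amount", 0),
   ("policy", 1), ("terms", 1), ("condition", 1), ("coverage", 1), ("include", 1),
   ("available", 2), ("offer", 2), ("provide", 2), ("service", 2), ("plan", 2),
   ("how", 3), ("process", 3), ("procedure", 3), ("step", 3),
   ("when", 4), ("time", 4), ("schedule", 4), ("appointment", 4),
   ("benefit", 5), ("advantage", 5), ("feature", 5),
   ("compare", 6), ("difference", 6), ("versus", 6), ("vs", 6)]

def ackMessages : List String :=
  ["Let me pull up our current pricing information for you.",
   "Let me check the policy details for you. One moment please.",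
   "Great question! Let me look up what we have available for you.",
   "Let me walk you through that process. Give me just a moment.",
   "Let me check our availability for you.",
   "Let me get you the details on those benefits.",
   "Good question! Let me gather that comparison information for you."]

def ackDefault : String := "Let me find the most accurate information for you. Just a moment."

-- min over the matching group indices, default = len(MESSAGES)
def generate_rag_acknowledgment_alt (user_query : String) (_agent : List (String × String)) : String :=
  let query_lower := PySem.Str.lower user_query
  let best := keywordGroup.foldl
    (fun acc p => if PySem.Str.isIn p.1 query_lower then min acc p.2 else acc)
    ackMessages.length
  if best < ackMessages.length then ackMessages.getD best ackDefault else ackDefault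

-- ===== PRECONDITION & SPEC =====
def Spec_generate_rag_acknowledgment (user_query : String) (agent : List (String × String)) (out : String) : Prop := out = generate_rag_acknowledgment_alt user_query agent
instance (user_query : String) (agent : List (String × String)) (out : String) : Decidable (Spec_generate_rag_acknowledgment user_query agent out) := by unfold Spec_generate_rag_acknowledgment; infer_instance

-- ===== CLAIM =====
def Claim_equal_generate_rag_acknowledgment : Prop := ∀ (user_query : String) (agent : List (String × String)), Dom_generate_rag_acknowledgment user_query agent → Spec_generate_rag_acknowledgment user_query agent (generate_rag_acknowledgment user_query agent)

-- ===== LEMMAS AND PROOFS =====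

-- folding B's min-step over one keyword group (all entries share index g)
theorem group_fold (p : String → Bool) (ws : List String) (g acc : Nat) :
    (ws.map (fun w => (w, g))).foldl
      (fun acc q => if p q.1 then min acc q.2 else acc) acc =
    if ws.any p then min acc g else acc := by
  induction ws generalizing acc with
  | nil => simp
  | cons w ws ih =>
    simp only [List.map, List.foldl, List.any_cons]
    by_cases h : p w = true
    · simp [h, ih]
    · simp [h, ih]

set_option maxHeartbeats 1000000 in
theorem generate_rag_acknowledgment_spec : Claim_equal_generate_rag_acknowledgment := by
  intro user_query agent _
  show _ = _
  simp only [generate_rag_acknowledgment, generate_rag_acknowledgment_alt]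
  have hsplit : keywordGroup =
      ((["price", "cost", "fee", "charge", "payment", "amount"] : List String).map (fun w => (w, 0))) ++
      ((["policy", "terms", "condition", "coverage", "include"] : List String).map (fun w => (w, 1))) ++
      ((["available", "offer", "provide", "service", "plan"] : List String).map (fun w => (w, 2))) ++
      ((["how", "process", "procedure", "step"] : List String).map (fun w => (w, 3))) ++
      ((["when", "time", "schedule", "appointment"] : List String).map (fun w => (w, 4))) ++
      ((["benefit", "advantage", "feature"] : List String).map (fun w => (w, 5))) ++
      ((["compare", "difference", "versus", "vs"] : List String).map (fun w => (w, 6))) := by rfl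
  rw [hsplit]
  simp only [List.foldl_append]
  rw [group_fold (fun w => PySem.Str.isIn w (PySem.Str.lower user_query)),
      group_fold (fun w => PySem.Str.isIn w (PySem.Str.lower user_query)),
      group_fold (fun w => PySem.Str.isIn w (PySem.Str.lower user_query)),
      group_fold (fun w => PySem.Str.isIn w (PySem.Str.lower user_query)),
      group_fold (fun w => PySem.Str.isIn w (PySem.Str.lower user_query)),
      group_fold (fun w => PySem.Str.isIn w (PySem.Str.lower user_query)),
      group_fold (fun w => PySem.Str.isIn w (PySem.Str.lower user_query))]
  simp only [ackMessages]
  generalize (["price", "cost", "fee", "charge", "payment", "amount"] : List String).any (fun word => PySem.Str.isIn word (PySem.Str.lower user_query)) = b0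
  generalize (["policy", "terms", "condition", "coverage", "include"] : List String).any (fun word => PySem.Str.isIn word (PySem.Str.lower user_query)) = b1
  generalize (["available", "offer", "provide", "service", "plan"] : List String).any (fun word => PySem.Str.isIn word (PySem.Str.lower user_query)) = b2
  generalize (["how", "process", "procedure", "step"] : List String).any (fun word => PySem.Str.isIn word (PySem.Str.lower user_query)) = b3
  generalize (["when", "time", "schedule", "appointment"] : List String).any (fun word => PySem.Str.isIn word (PySem.Str.lower user_query)) = b4
  generalize (["benefit", "advantage", "feature"] : List String).any (fun word => PySem.Str.isIn word (PySem.Str.lower user_query)) = b5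
  generalize (["compare", "difference", "versus", "vs"] : List String).any (fun word => PySem.Str.isIn word (PySem.Str.lower user_query)) = b6
  revert b0 b1 b2 b3 b4 b5 b6
  decide
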